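-- pv_equiv track=rewrite | github.com/alyssaschaubroeck/Informatica5 | 13 - Dictionaries/Fruitmand (met strik).py | fruitmand_maken
-- ===== SOURCE A (Python) =====
-- def fruitmand_maken(lijst):
--     fruitmand = {}
--     for item in lijst:
--         if len(item) not in fruitmand.keys():
--             fruitmand[len(item)] = item
--         else:
--             oud = fruitmand[len(item)]
--             if lijst.count(item) >= lijst.count(oud):
--                 fruitmand.pop(len(item))
--                 fruitmand[len(item)] = item
--     return fruitmand
-- ===== SOURCE B (Python) =====
-- def fruitmand_maken(lijst):
--     # One O(n) pipeline instead of A's quadratic dict-mutation loop: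
--     # per length class the surviving item is the LAST item whose global count
--     # is maximal within its class, and keys appear in order of those positions.
--     cnt = {}
--     for item in lijst:
--         cnt[item] = cnt.get(item, 0) + 1
--     maxc = {}
--     for item in lijst:
--         c = cnt[item]
--         if c > maxc.get(len(item), 0):
--             maxc[len(item)] = c
--     lastidx = {}
--     for i, item in enumerate(lijst):
--         if cnt[item] == maxc[len(item)]:
--             lastidx[len(item)] = i
--     return {len(item): item for i, item in enumerate(lijst) if lastidx[len(item)] == i}
-- ===== Notes on version B (the rewrite author's own statement) =====
-- stated objective: faster
-- what changed: A repeatedly calls lijst.count and mutates a dict with pop/re-insert to keep the winner per item-length; B instead builds a count table once, computes each length's maximal count and the last index attaining it, and emits the winners in one pass (the last max-count item per length, in order of those positions), turning the quadratic scan into linear passes.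
import Mathlib
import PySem

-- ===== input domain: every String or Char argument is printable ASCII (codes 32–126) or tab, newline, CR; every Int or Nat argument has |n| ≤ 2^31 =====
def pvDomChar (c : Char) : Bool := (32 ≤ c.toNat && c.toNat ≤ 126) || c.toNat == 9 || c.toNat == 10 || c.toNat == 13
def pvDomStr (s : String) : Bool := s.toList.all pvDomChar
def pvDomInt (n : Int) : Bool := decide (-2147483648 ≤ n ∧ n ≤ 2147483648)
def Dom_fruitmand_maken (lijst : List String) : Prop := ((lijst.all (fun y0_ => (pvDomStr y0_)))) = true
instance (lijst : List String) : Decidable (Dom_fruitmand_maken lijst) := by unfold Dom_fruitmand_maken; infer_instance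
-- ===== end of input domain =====

-- B replaces A's quadratic dict-mutation loop by an O(n)-lookup pipeline: count table, per-length
-- maximal count, last index attaining it, then one emit pass (same return value, including key order).

-- ===== PORT A =====
-- one loop iteration of A (dict keyed by len(item); pop+reinsert moves the key to the end)
def fmStep (lijst : List String) (fruitmand : PySem.Dict Int String) (item : String) : PySem.Dict Int String :=
  if fruitmand.contains (PySem.Str.len item) = false then
    fruitmand.insert (PySem.Str.len item) item
  else
    match fruitmand.get? (PySem.Str.len item) with
    | some oud =>
        if PySem.List.count lijst oud ≤ PySem.List.count lijst item then
          (fruitmand.erase (PySem.Str.len item)).insert (PySem.Str.len item) item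
        else fruitmand
    | none => fruitmand  -- unreachable: the key was just seen to be present

def fruitmand_maken (lijst : List String) : List (Int × String) :=
  (lijst.foldl (fmStep lijst) PySem.Dict.empty).items

-- ===== PORT B =====
-- cnt[item] = cnt.get(item, 0) + 1 over lijst
def altCnt (lijst : List String) : PySem.Dict String Int :=
  lijst.foldl (fun d item => d.insert item (d.getD item 0 + 1)) PySem.Dict.empty

-- maxc: per length, the maximal global count seen so far
def altMaxc (lijst : List String) : PySem.Dict Int Int :=
  lijst.foldl (fun d item =>
      if (altCnt lijst).getD item 0 > d.getD (PySem.Str.len item) 0 then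
        d.insert (PySem.Str.len item) ((altCnt lijst).getD item 0)
      else d)
    PySem.Dict.empty

-- lastidx: per length, the last index whose item attains that maximal count
def altLastidx (lijst : List String) : PySem.Dict Int Int :=
  (PySem.List.enumerate lijst).foldl (fun d p =>
      if (altCnt lijst).getD p.2 0 = (altMaxc lijst).getD (PySem.Str.len p.2) 0 then
        d.insert (PySem.Str.len p.2) p.1
      else d)
    PySem.Dict.empty

def fruitmand_maken_alt (lijst : List String) : List (Int × String) :=
  ((PySem.List.enumerate lijst).foldl (fun d p =>
      if (altLastidx lijst).getD (PySem.Str.len p.2) (-1) = p.1 then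
        d.insert (PySem.Str.len p.2) p.2
      else d)
    PySem.Dict.empty).items

-- ===== PRECONDITION & SPEC =====
def Spec_fruitmand_maken (lijst : List String) (out : List (Int × String)) : Prop := out = fruitmand_maken_alt lijst
instance (lijst : List String) (out : List (Int × String)) : Decidable (Spec_fruitmand_maken lijst out) := by unfold Spec_fruitmand_maken; infer_instance

-- ===== CLAIM (what is proved, stated in full; the proofs are below) =====
def Claim_equal_fruitmand_maken : Prop := ∀ (lijst : List String), Dom_fruitmand_maken lijst → Spec_fruitmand_maken lijst (fruitmand_maken lijst)

-- ===== LEMMAS AND PROOFS =====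

-- count of x in the full list, as the Nat List.count
def cN (l : List String) (x : String) : Nat := PySem.List.count l x

-- maximal count among items of length L in the prefix q (counts taken in the full list l)
def mxF (l q : List String) (L : Int) : Nat :=
  ((q.filter (fun y => PySem.Str.len y == L)).map (cN l)).foldl max 0

-- last index in q of an item of length L whose count attains mxF (-1 if none)
def lastFp (l q : List String) (L : Int) : Int :=
  (PySem.List.enumerate q).foldl
    (fun a r => if PySem.Str.len r.2 = L ∧ cN l r.2 = mxF l q L then r.1 else a) (-1)

-- the closed-form result for prefix q
def Fp (l q : List String) : List (Int × String) :=
  ((PySem.List.enumerate q).filter (fun r => lastFp l q (PySem.Str.len r.2) == r.1)).map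
    (fun r => (PySem.Str.len r.2, r.2))

-- A's loop body at the level of plain association lists
def Wstep (l : List String) (w : List (Int × String)) (x : String) : List (Int × String) :=
  match w.find? (fun p => p.1 == PySem.Str.len x) with
  | none => w ++ [(PySem.Str.len x, x)]
  | some p =>
      if cN l p.2 ≤ cN l x then
        (w.filter (fun p => !(p.1 == PySem.Str.len x))) ++ [(PySem.Str.len x, x)]
      else w

theorem fmStep_items (l : List String) (w : List (Int × String)) (x : String) :
    (fmStep l (PySem.Dict.mk w) x).items = Wstep l w x := by
  unfold fmStep Wstep cN
  generalize PySem.Str.len x = k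
  cases hf : w.find? (fun p => p.1 == k) with
  | none =>
      have hc : (PySem.Dict.mk w).contains k = false := by
        simp only [PySem.Dict.contains, List.any_eq_false]
        intro p hp
        simpa using List.find?_eq_none.mp hf p hp
      have hi : ((PySem.Dict.mk w).insert k x).items = w ++ [(k, x)] := by
        simp [PySem.Dict.insert, hc]
      simp [hc, hi]
  | some p =>
      have hpm : p ∈ w := List.mem_of_find?_eq_some hf
      have hpk : p.1 = k := by simpa using List.find?_some hf
      have hc : (PySem.Dict.mk w).contains k = true := by
        simp only [PySem.Dict.contains, List.any_eq_true]
        exact ⟨p, hpm, by simp [hpk]⟩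
      have hg : (PySem.Dict.mk w).get? k = some p.2 := by
        rw [show (PySem.Dict.mk w).get? k
              = Option.map (fun q => q.2) (w.find? (fun p => p.1 == k)) from rfl, hf]
        rfl
      rw [hc, if_neg (by decide : ¬((true : Bool) = false)), hg]
      dsimp only
      by_cases hcnt : PySem.List.count l p.2 ≤ PySem.List.count l x
      · rw [if_pos hcnt, if_pos hcnt]
        have : (((PySem.Dict.mk w).erase k).insert k x).items
            = (List.filter (fun p => !(p.1 == k)) w) ++ [(k, x)] := by
          simp [PySem.Dict.insert, PySem.Dict.erase]
        exact this
      · rw [if_neg hcnt, if_neg hcnt]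

theorem foldA_eq (l : List String) : ∀ (q : List String) (w : List (Int × String)),
    (q.foldl (fmStep l) (PySem.Dict.mk w)).items = q.foldl (Wstep l) w := by
  intro q
  induction q with
  | nil => intro w; rfl
  | cons x t ih =>
      intro w
      have h : fmStep l (PySem.Dict.mk w) x = PySem.Dict.mk (Wstep l w x) :=
        PySem.Dict.ext (fmStep_items l w x)
      simp only [List.foldl_cons, h, ih]

-- F1: how mxF changes when one item is appended to the prefix
theorem mxF_append (l q : List String) (x : String) (L : Int) :
    mxF l (q ++ [x]) L = if PySem.Str.len x = L then max (mxF l q L) (cN l x) else mxF l q L := by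
  unfold mxF
  rw [List.filter_append]
  by_cases h : PySem.Str.len x = L
  · have h' : ((x.length : Int) = L) := by simpa [PySem.Str.len] using h
    simp [h', List.foldl_append]
  · have h' : ¬((x.length : Int) = L) := by simpa [PySem.Str.len] using h
    simp [h']

-- a bounded accumulator stays bounded through an if-update fold
theorem foldl_if_bound {α : Type} (P : α → Prop) [DecidablePred P] (key : α → Int) (n : Int) :
    ∀ (e : List α) (a : Int), (∀ r ∈ e, key r < n) → a < n →
      e.foldl (fun a r => if P r then key r else a) a < n := by
  intro e
  induction e with
  | nil => intro a _ ha; simpa using ha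
  | cons b t ih =>
      intro a hall ha
      simp only [List.foldl_cons]
      by_cases hb : P b
      · rw [if_pos hb]
        exact ih _ (fun r hr => hall r (by simp [hr])) (hall b (by simp))
      · rw [if_neg hb]
        exact ih _ (fun r hr => hall r (by simp [hr])) ha

theorem lastFp_lt (l q : List String) (L : Int) :
    lastFp l q L < (q.length : Int) := by
  unfold lastFp
  apply foldl_if_bound
  · intro r hr
    obtain ⟨k, hk, rfl⟩ := (PySem.List.mem_enumerate_iff _ _ _).mp hr
    simpa using hk
  · have : (0 : Int) ≤ (q.length : Int) := by positivity
    omega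

-- F2/F3: how lastFp changes when one item is appended
theorem lastFp_append_ne (l q : List String) (x : String) (L : Int) (h : PySem.Str.len x ≠ L) :
    lastFp l (q ++ [x]) L = lastFp l q L := by
  unfold lastFp
  rw [PySem.List.enumerate_append, List.foldl_append]
  have hm : mxF l (q ++ [x]) L = mxF l q L := by rw [mxF_append, if_neg h]
  simp only [hm]
  rw [PySem.List.enumerate_cons, PySem.List.enumerate_nil]
  simp only [List.foldl_cons, List.foldl_nil]
  rw [if_neg (fun hc => h hc.1)]

theorem lastFp_append_lt (l q : List String) (x : String)
    (h : cN l x < mxF l q (PySem.Str.len x)) :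
    lastFp l (q ++ [x]) (PySem.Str.len x) = lastFp l q (PySem.Str.len x) := by
  unfold lastFp
  rw [PySem.List.enumerate_append, List.foldl_append]
  have hm : mxF l (q ++ [x]) (PySem.Str.len x) = mxF l q (PySem.Str.len x) := by
    rw [mxF_append, if_pos rfl]
    exact Nat.max_eq_left (Nat.le_of_lt h)
  simp only [hm]
  rw [PySem.List.enumerate_cons, PySem.List.enumerate_nil]
  simp only [List.foldl_cons, List.foldl_nil]
  rw [if_neg (fun hc => absurd hc.2 (Nat.ne_of_lt h))]

theorem lastFp_append_ge (l q : List String) (x : String)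
    (h : mxF l q (PySem.Str.len x) ≤ cN l x) :
    lastFp l (q ++ [x]) (PySem.Str.len x) = (q.length : Int) := by
  unfold lastFp
  rw [PySem.List.enumerate_append, List.foldl_append]
  have hm : mxF l (q ++ [x]) (PySem.Str.len x) = cN l x := by
    rw [mxF_append, if_pos rfl]
    exact Nat.max_eq_right h
  simp only [hm]
  rw [PySem.List.enumerate_cons, PySem.List.enumerate_nil]
  simp only [List.foldl_cons, List.foldl_nil]
  rw [if_pos (by simp)]
  omega

-- STEP: the closed form evolves exactly like A's loop body
theorem Fp_append (l q : List String) (x : String) :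
    Fp l (q ++ [x]) =
      if mxF l q (PySem.Str.len x) ≤ cN l x then
        (Fp l q).filter (fun e => !(e.1 == PySem.Str.len x)) ++ [(PySem.Str.len x, x)]
      else Fp l q := by
  have hidx : ∀ r ∈ PySem.List.enumerate q 0, r.1 < (q.length : Int) := by
    intro r hr
    obtain ⟨k, hk, rfl⟩ := (PySem.List.mem_enumerate_iff _ _ _).mp hr
    simpa using hk
  unfold Fp
  rw [PySem.List.enumerate_append, PySem.List.enumerate_cons, PySem.List.enumerate_nil,
    List.filter_append, List.map_append]
  simp only [zero_add, PySem.Str.len_eq, String.length_toList]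
  by_cases hc : mxF l q (PySem.Str.len x) ≤ cN l x
  · have hc' : mxF l q ((x.length : Int)) ≤ cN l x := by
      simpa only [PySem.Str.len_eq, String.length_toList] using hc
    rw [if_pos hc']
    have hge := lastFp_append_ge l q x hc
    simp only [PySem.Str.len_eq, String.length_toList] at hge
    congr 1
    · rw [List.filter_map, List.filter_filter]
      apply congrArg (List.map _)
      apply List.filter_congr
      intro r hr
      by_cases hlen : ((r.2.length : Int)) = ((x.length : Int))
      · have h1 : lastFp l (q ++ [x]) ((r.2.length : Int)) = (q.length : Int) := by
          rw [hlen, hge]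
        have h2 : ((q.length : Int) == r.1) = false := by
          have := hidx r hr
          simp only [beq_eq_false_iff_ne, ne_eq]
          omega
        simp [hlen, Function.comp]
        rw [hge]
        simpa using h2
      · have h1 := lastFp_append_ne l q x ((r.2.length : Int))
          (by simpa only [PySem.Str.len_eq, String.length_toList] using Ne.symm hlen)
        simp [h1, hlen, Function.comp]
    · simp [hge]
  · have hc' : ¬ mxF l q ((x.length : Int)) ≤ cN l x := by
      simpa only [PySem.Str.len_eq, String.length_toList] using hc
    rw [if_neg hc']
    have hlt := lastFp_append_lt l q x (Nat.lt_of_not_le hc)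
    simp only [PySem.Str.len_eq, String.length_toList] at hlt
    have hb := lastFp_lt l q (PySem.Str.len x)
    simp only [PySem.Str.len_eq, String.length_toList] at hb
    have hcond : ¬ (lastFp l (q ++ [x]) ((x.length : Int)) = (q.length : Int)) := by
      rw [hlt]
      omega
    have h2 : List.filter (fun r => lastFp l (q ++ [x]) ((r.2.length : Int)) == r.1)
        [((q.length : Int), x)] = [] := by
      simp [hcond]
    rw [h2]
    simp only [List.map_nil, List.append_nil]
    apply congrArg (List.map _)
    apply List.filter_congr
    intro r hr
    by_cases hlen : ((r.2.length : Int)) = ((x.length : Int))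
    · rw [hlen, hlt, ← hlen]
    · rw [lastFp_append_ne l q x ((r.2.length : Int))
        (by simpa only [PySem.Str.len_eq, String.length_toList] using Ne.symm hlen)]

-- mxF is unchanged at other keys, and everywhere when the appended item loses
theorem mxF_append_ne (l q : List String) (x : String) (L : Int) (h : PySem.Str.len x ≠ L) :
    mxF l (q ++ [x]) L = mxF l q L := by
  rw [mxF_append, if_neg h]

theorem mxF_append_keep (l q : List String) (x : String) (L : Int)
    (hc : ¬ mxF l q (PySem.Str.len x) ≤ cN l x) :
    mxF l (q ++ [x]) L = mxF l q L := by
  rw [mxF_append]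
  by_cases h : PySem.Str.len x = L
  · rw [if_pos h, ← h, Nat.max_eq_left (Nat.le_of_lt (Nat.lt_of_not_le hc))]
  · rw [if_neg h]

-- invariants of the closed form on prefixes of l
theorem Fp_inv (l : List String) : ∀ (q r : List String), q ++ r = l →
    (∀ e ∈ Fp l q, PySem.Str.len e.2 = e.1 ∧ cN l e.2 = mxF l q e.1) ∧
    (∀ L : Int, (∃ e ∈ Fp l q, e.1 = L) ↔ 0 < mxF l q L) := by
  intro q
  induction q using List.reverseRecOn with
  | nil =>
      intro r h
      constructor
      · intro e he
        simp [Fp, PySem.List.enumerate_nil] at he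
      · intro L
        simp [Fp, PySem.List.enumerate_nil, mxF]
  | append_singleton q x ih =>
      intro r h
      have hql : q ++ (x :: r) = l := by simpa using h
      obtain ⟨ih1, ih2⟩ := ih (x :: r) hql
      have hx : x ∈ l := by rw [← hql]; simp
      have hcx : 0 < cN l x := by
        unfold cN PySem.List.count
        exact List.count_pos_iff.mpr hx
      by_cases hc : mxF l q (PySem.Str.len x) ≤ cN l x
      · constructor
        · intro e he
          rw [Fp_append, if_pos hc] at he
          rcases List.mem_append.mp he with hf | hn
          · obtain ⟨hmem, hkey⟩ := List.mem_filter.mp hf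
            have hkey' : e.1 ≠ PySem.Str.len x := by simpa using hkey
            obtain ⟨h1, h2⟩ := ih1 e hmem
            exact ⟨h1, by rw [h2, mxF_append_ne l q x e.1 (Ne.symm hkey')]⟩
          · have he' : e = (PySem.Str.len x, x) := by simpa using hn
            subst he'
            refine ⟨rfl, ?_⟩
            rw [mxF_append, if_pos rfl, Nat.max_eq_right hc]
        · intro L
          rw [Fp_append, if_pos hc]
          by_cases hL : L = PySem.Str.len x
          · subst hL
            apply iff_of_true
            · exact ⟨(PySem.Str.len x, x), by simp, rfl⟩
            · rw [mxF_append, if_pos rfl, Nat.max_eq_right hc]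
              exact hcx
          · rw [mxF_append_ne l q x L (fun hh => hL hh.symm), ← ih2 L]
            constructor
            · rintro ⟨e, he, rfl⟩
              rcases List.mem_append.mp he with hf | hn
              · exact ⟨e, (List.mem_filter.mp hf).1, rfl⟩
              · exact absurd (congrArg Prod.fst (by simpa using hn)) hL
            · rintro ⟨e, he, rfl⟩
              exact ⟨e, List.mem_append.mpr (Or.inl (List.mem_filter.mpr ⟨he, by simpa using hL⟩)), rfl⟩
      · constructor
        · intro e he
          rw [Fp_append, if_neg hc] at he
          obtain ⟨h1, h2⟩ := ih1 e he
          exact ⟨h1, by rw [h2, mxF_append_keep l q x e.1 hc]⟩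
        · intro L
          rw [Fp_append, if_neg hc, mxF_append_keep l q x L hc]
          exact ih2 L

-- MAIN: A's fold equals the closed form
theorem main_eq (l : List String) : ∀ (q r : List String), q ++ r = l →
    q.foldl (Wstep l) [] = Fp l q := by
  intro q
  induction q using List.reverseRecOn with
  | nil =>
      intro r h
      simp [Fp, PySem.List.enumerate_nil]
  | append_singleton q x ih =>
      intro r h
      have hql : q ++ (x :: r) = l := by simpa using h
      obtain ⟨inv1, inv2⟩ := Fp_inv l q (x :: r) hql
      rw [List.foldl_append, List.foldl_cons, List.foldl_nil, ih (x :: r) hql, Fp_append]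
      unfold Wstep
      cases hf : (Fp l q).find? (fun p => p.1 == PySem.Str.len x) with
      | none =>
          have hno : ∀ e ∈ Fp l q, e.1 ≠ PySem.Str.len x := by
            intro e he heq
            have := List.find?_eq_none.mp hf e he
            simp [heq] at this
          have hm : mxF l q (PySem.Str.len x) = 0 := by
            by_contra hns
            obtain ⟨e, he, hk⟩ := (inv2 (PySem.Str.len x)).mpr (Nat.pos_of_ne_zero hns)
            exact hno e he hk
          rw [if_pos (by rw [hm]; exact Nat.zero_le _)]
          rw [List.filter_eq_self.mpr (fun e he => by simpa using hno e he)]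
      | some p =>
          have hpm : p ∈ Fp l q := List.mem_of_find?_eq_some hf
          have hpk : p.1 = PySem.Str.len x := by simpa using List.find?_some hf
          have hcnt : cN l p.2 = mxF l q (PySem.Str.len x) := by
            have h2 := (inv1 p hpm).2
            rw [hpk] at h2
            exact h2
          dsimp only
          by_cases hcc : mxF l q (PySem.Str.len x) ≤ cN l x
          · rw [if_pos (show cN l p.2 ≤ cN l x by rw [hcnt]; exact hcc), if_pos hcc]
          · rw [if_neg (show ¬ cN l p.2 ≤ cN l x by rw [hcnt]; exact hcc), if_neg hcc]

-- B side
theorem altCnt_getD (l : List String) (x : String) :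
    (altCnt l).getD x 0 = (cN l x : Int) := by
  unfold altCnt cN PySem.List.count
  rw [PySem.Dict.getD_foldl_insert_add_one]
  simp

theorem altMaxc_getD_aux (l : List String) : ∀ (q : List String) (L : Int),
    (q.foldl (fun d item =>
        if ((cN l item : Int)) > d.getD (PySem.Str.len item) 0 then
          d.insert (PySem.Str.len item) ((cN l item : Int))
        else d) PySem.Dict.empty).getD L 0 = (mxF l q L : Int) := by
  intro q
  induction q using List.reverseRecOn with
  | nil => intro L; simp [mxF]
  | append_singleton q x ih =>
      intro L
      rw [List.foldl_append, List.foldl_cons, List.foldl_nil, mxF_append]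
      by_cases hgt : ((cN l x : Int)) > ((mxF l q (PySem.Str.len x) : Int))
      · rw [if_pos (by rw [ih]; exact hgt), PySem.Dict.getD_insert]
        by_cases h : L = PySem.Str.len x
        · rw [if_pos h, if_pos h.symm, h]
          have hle : mxF l q (PySem.Str.len x) ≤ cN l x := by exact_mod_cast Int.le_of_lt hgt
          rw [Nat.max_eq_right hle]
        · rw [if_neg h, if_neg (fun hh => h hh.symm), ih]
      · rw [if_neg (by rw [ih]; exact hgt), ih]
        by_cases h : PySem.Str.len x = L
        · rw [if_pos h, ← h]
          have hle : cN l x ≤ mxF l q (PySem.Str.len x) := by exact_mod_cast Int.not_lt.mp hgt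
          rw [Nat.max_eq_left hle]
        · rw [if_neg h]

theorem altMaxc_getD (l : List String) (L : Int) :
    (altMaxc l).getD L 0 = (mxF l l L : Int) := by
  unfold altMaxc
  simp only [altCnt_getD]
  exact altMaxc_getD_aux l l L

theorem altLastidx_getD_aux (l : List String) : ∀ (e : List (Int × String)) (L : Int),
    (e.foldl (fun d p =>
        if ((cN l p.2 : Int)) = ((mxF l l (PySem.Str.len p.2) : Int)) then
          d.insert (PySem.Str.len p.2) p.1
        else d) PySem.Dict.empty).getD L (-1)
      = e.foldl (fun a r => if PySem.Str.len r.2 = L ∧ cN l r.2 = mxF l l L then r.1 else a) (-1) := by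
  intro e
  induction e using List.reverseRecOn with
  | nil => intro L; simp
  | append_singleton e p ih =>
      intro L
      rw [List.foldl_append, List.foldl_cons, List.foldl_nil,
          List.foldl_append, List.foldl_cons, List.foldl_nil]
      by_cases hcond : ((cN l p.2 : Int)) = ((mxF l l (PySem.Str.len p.2) : Int))
      · rw [if_pos hcond]
        by_cases h : L = PySem.Str.len p.2
        · rw [PySem.Dict.getD_insert, if_pos h,
            if_pos ⟨h.symm, by rw [h]; exact_mod_cast hcond⟩]
        · rw [PySem.Dict.getD_insert, if_neg h, ih,
            if_neg (fun hc => h hc.1.symm)]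
      · rw [if_neg hcond, ih,
          if_neg (fun hc => hcond (by rw [← hc.1] at hc; exact_mod_cast hc.2))]

theorem altLastidx_getD (l : List String) (L : Int) :
    (altLastidx l).getD L (-1) = lastFp l l L := by
  unfold altLastidx lastFp
  simp only [altCnt_getD, altMaxc_getD]
  exact altLastidx_getD_aux l (PySem.List.enumerate l) L

-- an if-guarded insert loop is the unguarded loop over the filtered list
theorem foldl_if_insert {α κ ν : Type} [BEq κ] (P : α → Prop) [DecidablePred P]
    (k : α → κ) (v : α → ν) :
    ∀ (e : List α) (d : PySem.Dict κ ν),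
      e.foldl (fun d p => if P p then d.insert (k p) (v p) else d) d
        = (e.filter (fun p => decide (P p))).foldl (fun d p => d.insert (k p) (v p)) d := by
  intro e
  induction e with
  | nil => intro d; rfl
  | cons a t ih =>
      intro d
      by_cases h : P a
      · simp [h, ih]
      · simp [h, ih]

set_option maxHeartbeats 1000000 in
theorem alt_eq (l : List String) : fruitmand_maken_alt l = Fp l l := by
  unfold fruitmand_maken_alt
  simp only [altLastidx_getD]
  have hfi : (PySem.List.enumerate l).foldl
      (fun d p => if lastFp l l (PySem.Str.len p.2) = p.1 then d.insert (PySem.Str.len p.2) p.2 else d)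
      PySem.Dict.empty
    = ((PySem.List.enumerate l).filter
        (fun p => decide (lastFp l l (PySem.Str.len p.2) = p.1))).foldl
        (fun d p => d.insert (PySem.Str.len p.2) p.2) PySem.Dict.empty :=
    foldl_if_insert (fun p => lastFp l l (PySem.Str.len p.2) = p.1)
      (fun p => PySem.Str.len p.2) (fun p => p.2) (PySem.List.enumerate l) PySem.Dict.empty
  rw [hfi]
  have hpred : (PySem.List.enumerate l).filter (fun p => decide (lastFp l l (PySem.Str.len p.2) = p.1))
      = (PySem.List.enumerate l).filter (fun r => lastFp l l (PySem.Str.len r.2) == r.1) := by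
    apply List.filter_congr
    intro r _
    by_cases h : lastFp l l (PySem.Str.len r.2) = r.1
    all_goals
      simp only [PySem.Str.len_eq, String.length_toList] at h
      simp [h]
  rw [hpred]
  have hnodup : (((PySem.List.enumerate l).filter
      (fun r => lastFp l l (PySem.Str.len r.2) == r.1)).map (fun p => PySem.Str.len p.2)).Nodup := by
    rw [List.Nodup, List.pairwise_map]
    have hpw : ((PySem.List.enumerate l).filter
        (fun r => lastFp l l (PySem.Str.len r.2) == r.1)).Pairwise (fun a b => a.1 < b.1) :=
      (PySem.List.pairwise_lt_enumerate l 0).filter _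
    apply List.Pairwise.imp_of_mem ?_ hpw
    intro a b ha hb hlt heq
    have ha' : lastFp l l (PySem.Str.len a.2) = a.1 := by
      simpa using (List.mem_filter.mp ha).2
    have hb' : lastFp l l (PySem.Str.len b.2) = b.1 := by
      simpa using (List.mem_filter.mp hb).2
    rw [heq, hb'] at ha'
    omega
  rw [PySem.Dict.items_foldl_insert_fresh _ _ _ _ (by intro a _; simp) hnodup]
  unfold Fp
  simp [PySem.Dict.empty]

-- ===== VERDICT (by name: the statement is the Claim_ definition above) =====
theorem fruitmand_maken_spec : Claim_equal_fruitmand_maken := by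
  intro l _
  unfold Spec_fruitmand_maken
  have hA : fruitmand_maken l = Fp l l := by
    have := foldA_eq l l []
    unfold fruitmand_maken
    rw [show (PySem.Dict.empty : PySem.Dict Int String) = PySem.Dict.mk [] from rfl, this,
      main_eq l l [] (by simp)]
  rw [hA, alt_eq]
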